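-- pv_equiv track=rewrite | github.com/teekuningas/notebooks | nb_koodit.py | format_cluster_contents
-- ===== SOURCE A (Python) =====
-- def format_cluster_contents(clusters, codes):
--     cluster_dict = {}
--     for cluster_id, code in zip(clusters, codes):
--         if cluster_id not in cluster_dict:
--             cluster_dict[cluster_id] = []
--         cluster_dict[cluster_id].append(code)
--
--     html = "<div style='max-height: 400px; overflow-y: auto;'>"
--     for cluster_id in sorted(cluster_dict.keys()):
--         items = cluster_dict[cluster_id]
--         html += f"<p><strong>Cluster {cluster_id}</strong> ({len(items)} items):<br>"
--         html += ", ".join([item['code'] for item in items])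
--         html += "</p>"
--     html += "</div>"
--     return html
-- ===== SOURCE B (Python) =====
-- def format_cluster_contents(clusters, codes):
--     # Sort the zipped pairs stably by cluster id, then emit contiguous runs --
--     # no grouping dict is ever built.
--     pairs = sorted(zip(clusters, codes), key=lambda q: q[0])
--     html = "<div style='max-height: 400px; overflow-y: auto;'>"
--     i = 0
--     n = len(pairs)
--     while i < n:
--         cid = pairs[i][0]
--         j = i + 1
--         while j < n and pairs[j][0] == cid:
--             j += 1
--         group = [pairs[t][1] for t in range(i, j)]
--         html += f"<p><strong>Cluster {cid}</strong> ({len(group)} items):<br>"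
--         html += ", ".join(item['code'] for item in group)
--         html += "</p>"
--         i = j
--     html += "</div>"
--     return html
-- ===== Notes on version B (the rewrite author's own statement) =====
-- stated objective: alternative
-- what changed: Replaces the grouping dict keyed by cluster id with a stable sort of the zipped (cluster, code) pairs followed by a single scan over contiguous equal-id runs; Pre_ excludes inputs where a zipped code dict lacks the 'code' key, on which both A and B raise KeyError.
import Mathlib
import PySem

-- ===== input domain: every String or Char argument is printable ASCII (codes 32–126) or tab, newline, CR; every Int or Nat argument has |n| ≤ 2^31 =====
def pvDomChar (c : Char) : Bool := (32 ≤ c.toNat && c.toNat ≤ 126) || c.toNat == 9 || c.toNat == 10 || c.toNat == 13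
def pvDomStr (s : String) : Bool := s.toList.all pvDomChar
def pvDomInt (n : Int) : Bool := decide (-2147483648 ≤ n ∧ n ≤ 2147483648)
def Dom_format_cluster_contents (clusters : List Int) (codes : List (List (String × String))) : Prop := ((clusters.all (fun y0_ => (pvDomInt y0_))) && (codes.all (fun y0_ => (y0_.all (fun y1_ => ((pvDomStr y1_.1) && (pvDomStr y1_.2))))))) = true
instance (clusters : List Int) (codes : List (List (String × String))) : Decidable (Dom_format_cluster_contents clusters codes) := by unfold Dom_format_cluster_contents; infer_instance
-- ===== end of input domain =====

-- B replaces A's grouping dict with a stable sort of the zipped pairs followed by one scan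
-- over contiguous equal-id runs (objective: alternative, same cost class).

-- ===== PORT A =====
def format_cluster_contents (clusters : List Int) (codes : List (List (String × String))) : String :=
  let cluster_dict : PySem.Dict Int (List (List (String × String))) :=
    (clusters.zip codes).foldl
      (fun cluster_dict p =>
        let cluster_dict := if cluster_dict.contains p.1 then cluster_dict else cluster_dict.insert p.1 []
        cluster_dict.modify p.1 [] (fun items => items ++ [p.2]))
      PySem.Dict.empty
  let html := "<div style='max-height: 400px; overflow-y: auto;'>"
  let html := (PySem.List.sorted cluster_dict.keys (fun k => k)).foldl
    (fun html cluster_id =>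
      let items := cluster_dict.getD cluster_id []
      let html := html ++ "<p><strong>Cluster " ++ PySem.Int.toStr cluster_id ++ "</strong> ("
        ++ PySem.Int.toStr (PySem.List.len items) ++ " items):<br>"
      -- item['code'] raises KeyError when absent; total getD used under Pre_
      let html := html ++ PySem.Str.join ", " (items.map (fun item => PySem.Dict.getD (PySem.Dict.mk item) "code" ""))
      html ++ "</p>")
    html
  html ++ "</div>"

-- ===== PORT B =====
-- the inner while-loop of Source B: split off the contiguous run of the head's cluster id
def pvGroupRuns : List (Int × List (String × String)) → List (Int × List (List (String × String)))
  | [] => []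
  | p :: rest =>
      (p.1, p.2 :: (rest.takeWhile (fun q => q.1 == p.1)).map (fun q => q.2)) ::
        pvGroupRuns (rest.dropWhile (fun q => q.1 == p.1))
  termination_by l => l.length
  decreasing_by exact Nat.lt_succ_of_le (List.length_dropWhile_le _ _)

def format_cluster_contents_alt (clusters : List Int) (codes : List (List (String × String))) : String :=
  let pairs := PySem.List.sorted (clusters.zip codes) (fun q => q.1)
  let html := (pvGroupRuns pairs).foldl
    (fun html g =>
      let html := html ++ "<p><strong>Cluster " ++ PySem.Int.toStr g.1 ++ "</strong> ("
        ++ PySem.Int.toStr (PySem.List.len g.2) ++ " items):<br>"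
      let html := html ++ PySem.Str.join ", " (g.2.map (fun item => PySem.Dict.getD (PySem.Dict.mk item) "code" ""))
      html ++ "</p>")
    "<div style='max-height: 400px; overflow-y: auto;'>"
  html ++ "</div>"

-- ===== PRECONDITION & SPEC =====
-- Pre_ excludes exactly the inputs where some zipped code dict lacks the key 'code':
-- there A raises KeyError and returns nothing (B raises there too).
def Pre_format_cluster_contents (clusters : List Int) (codes : List (List (String × String))) : Prop :=
  ∀ p ∈ clusters.zip codes, (PySem.Dict.mk p.2).contains "code" = true
instance (clusters : List Int) (codes : List (List (String × String))) : Decidable (Pre_format_cluster_contents clusters codes) := by unfold Pre_format_cluster_contents; infer_instance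

def pvWitness_format_cluster_contents : List Int × (List (List (String × String))) :=
  ([0, 1, 0], [[("code", "a")], [("code", "b")], [("code", "c")]])

def Spec_format_cluster_contents (clusters : List Int) (codes : List (List (String × String))) (out : String) : Prop := out = format_cluster_contents_alt clusters codes
instance (clusters : List Int) (codes : List (List (String × String))) (out : String) : Decidable (Spec_format_cluster_contents clusters codes out) := by unfold Spec_format_cluster_contents; infer_instance

-- ===== CLAIM (what is proved, stated in full; the proofs are below) =====
def Claim_equal_format_cluster_contents : Prop := ∀ (clusters : List Int) (codes : List (List (String × String))), Dom_format_cluster_contents clusters codes → Pre_format_cluster_contents clusters codes → Spec_format_cluster_contents clusters codes (format_cluster_contents clusters codes)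

-- ===== LEMMAS AND PROOFS =====

-- A's loop body equals the plain modify step (the 'if absent then insert []' is absorbed)
lemma pvStepA_eq (d : PySem.Dict Int (List (List (String × String)))) (p : Int × List (String × String)) :
    (let d' := if d.contains p.1 then d else d.insert p.1 []
     d'.modify p.1 [] (fun items => items ++ [p.2])) = d.modify p.1 [] (fun items => items ++ [p.2]) := by
  show ((if d.contains p.1 then d else d.insert p.1 []).modify p.1 [] _) = _
  by_cases h : d.contains p.1 = true
  · rw [if_pos h]
  · rw [if_neg h]
    show (d.insert p.1 []).insert p.1 _ = d.insert p.1 _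
    rw [PySem.Dict.getD_insert_self, PySem.Dict.insert_insert_self]
    have : PySem.Dict.getD d p.1 ([] : List (List (String × String))) = [] :=
      PySem.Dict.getD_of_not_contains d [] (by simpa using h)
    rw [this]

-- all-true prefix, all-false suffix: takeWhile / dropWhile split an append exactly there
lemma pvTakeWhile_append {α : Type} (p : α → Bool) (u v : List α)
    (hu : ∀ x ∈ u, p x = true) (hv : ∀ x ∈ v, p x = false) :
    (u ++ v).takeWhile p = u := by
  induction u with
  | nil => cases v with
    | nil => rfl
    | cons y t => simp [hv y (by simp)]
  | cons x t ih => simp [hu x (by simp), ih (fun x hx => hu x (by simp [hx]))]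

lemma pvDropWhile_append {α : Type} (p : α → Bool) (u v : List α)
    (hu : ∀ x ∈ u, p x = true) (hv : ∀ x ∈ v, p x = false) :
    (u ++ v).dropWhile p = v := by
  induction u with
  | nil => cases v with
    | nil => rfl
    | cons y t => simp [hv y (by simp)]
  | cons x t ih => simp [hu x (by simp), ih (fun x hx => hu x (by simp [hx]))]

-- insertBy lands between the false prefix and the true suffix
lemma pvInsertBy_append {α : Type} (before : α → α → Bool) (x : α) (u v : List α)
    (hu : ∀ y ∈ u, before x y = false) (hv : ∀ y ∈ v, before x y = true) :
    PySem.List.insertBy before x (u ++ v) = u ++ x :: v := by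
  induction u with
  | nil =>
      cases v with
      | nil => rfl
      | cons y t => simp [PySem.List.insertBy, hv y (by simp)]
  | cons z t ih =>
      simp [PySem.List.insertBy, hu z (by simp), ih (fun y hy => hu y (by simp [hy]))]

-- elements dropped by 'k ≤ a' from a strictly increasing list are all > a
lemma pvDropWhile_gt (a : Int) (K : List Int) (h : K.Pairwise (· < ·)) :
    ∀ k ∈ K.dropWhile (fun k => decide (k ≤ a)), a < k := by
  induction K with
  | nil => simp
  | cons b t ih =>
      rw [List.pairwise_cons] at h
      intro k hk
      rw [List.dropWhile_cons] at hk
      by_cases hb : b ≤ a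
      · simp only [decide_eq_true_eq, hb, if_pos] at hk
        exact ih h.2 k hk
      · simp only [decide_eq_true_eq, hb] at hk
        rcases List.mem_cons.mp hk with rfl | hm
        · omega
        · exact lt_trans (by omega) (h.1 k hm)

lemma pvOfList_append (xs : List Int) (a : Int) :
    PySem.Set.ofList (xs ++ [a]) =
      if a ∈ xs then PySem.Set.ofList xs else PySem.Set.ofList xs ++ [a] := by
  rw [PySem.Set.ofList_eq_foldl, List.foldl_append, ← PySem.Set.ofList_eq_foldl]
  show PySem.Set.add _ a = _
  simp [PySem.Set.add, PySem.Set.contains, PySem.Set.mem_ofList]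

-- appending e to the group of a, when a is the largest (hence last) listed key
lemma pvFlatMap_append_last {β : Type} (a : Int) (K : List Int) (g : Int → List β) (e : List β)
    (hpw : K.Pairwise (· < ·)) (hle : ∀ k ∈ K, k ≤ a) (ha : a ∈ K) :
    K.flatMap (fun k => g k ++ if a == k then e else []) = K.flatMap g ++ e := by
  induction K with
  | nil => simp at ha
  | cons k t ih =>
      rw [List.pairwise_cons] at hpw
      rcases List.mem_cons.mp ha with rfl | hat
      · have ht : t = [] := by
          rw [List.eq_nil_iff_forall_not_mem]
          intro m hm
          have := hpw.1 m hm
          have := hle m (by simp [hm])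
          omega
        subst ht; simp
      · have hne : (a == k) = false := by
          have := hpw.1 a hat
          simp; omega
        simp only [List.flatMap_cons, hne, Bool.false_eq_true, if_false, List.append_nil,
          ih hpw.2 (fun m hm => hle m (by simp [hm])) hat, List.append_assoc]

-- THE SORT CHARACTERISATION: a stable sort by first component is the concatenation,
-- over the sorted distinct keys, of each key's occurrences in original order.
lemma pvSorted_fst_eq_flatMap {α : Type} (ps : List (Int × α)) :
    PySem.List.sorted ps (fun q => q.1) =
      (PySem.List.sorted (PySem.Set.ofList (ps.map (fun q => q.1))) (fun k => k)).flatMap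
        (fun k => ps.filter (fun q => q.1 == k)) := by
  induction ps using List.reverseRecOn with
  | nil => rfl
  | append_singleton l p ih =>
    have key : ∀ (m : List (Int × α)), PySem.List.sorted m (fun q => q.1) =
        List.foldl (fun acc x => PySem.List.insertBy (fun s t => decide (s.1 < t.1)) x acc) [] m :=
      fun m => PySem.List.sorted_eq_foldl_insertBy m _
    have hL : PySem.List.sorted (l ++ [p]) (fun q => q.1) =
        PySem.List.insertBy (fun s t => decide (s.1 < t.1)) p (PySem.List.sorted l (fun q => q.1)) := by
      rw [key, key, List.foldl_append]; rfl
    set a := p.1 with ha_def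
    set K : List Int := PySem.List.sorted (PySem.Set.ofList (l.map (fun q => q.1))) (fun k => k) with hK_def
    have hpwK : K.Pairwise (· < ·) := PySem.List.sorted_ofList_pairwise_lt _
    set K₁ := K.takeWhile (fun k => decide (k ≤ a)) with hK1_def
    set K₂ := K.dropWhile (fun k => decide (k ≤ a)) with hK2_def
    have hsplit : K₁ ++ K₂ = K := List.takeWhile_append_dropWhile
    have hK1le : ∀ k ∈ K₁, k ≤ a := fun k hk => by
      have := List.mem_takeWhile_imp hk; simpa using this
    have hK2gt : ∀ k ∈ K₂, a < k := pvDropWhile_gt a K hpwK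
    have hfst : ∀ (k : Int) (q : Int × α), q ∈ l.filter (fun q => q.1 == k) → q.1 = k := by
      intro k q hq
      have := List.of_mem_filter hq; simpa using this
    have hLHS : PySem.List.sorted (l ++ [p]) (fun q => q.1) =
        K₁.flatMap (fun k => l.filter (fun q => q.1 == k)) ++
          p :: K₂.flatMap (fun k => l.filter (fun q => q.1 == k)) := by
      rw [hL, ih, ← hsplit, List.flatMap_append]
      apply pvInsertBy_append
      · intro y hy
        rcases List.mem_flatMap.mp hy with ⟨k, hk, hyk⟩
        have h1 := hfst k y hyk
        have h2 := hK1le k hk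
        simp [h1]; omega
      · intro y hy
        rcases List.mem_flatMap.mp hy with ⟨k, hk, hyk⟩
        have h1 := hfst k y hyk
        have h2 := hK2gt k hk
        simp [h1]; omega
    have hfilter : ∀ k : Int, (l ++ [p]).filter (fun q => q.1 == k) =
        l.filter (fun q => q.1 == k) ++ if a == k then [p] else [] := by
      intro k
      rw [List.filter_append]
      congr 1
      simp only [List.filter_cons, List.filter_nil]
      rfl
    rw [hLHS, List.map_append]
    simp only [List.map_cons, List.map_nil]
    by_cases hmem : a ∈ l.map (fun q => q.1)
    · -- a already a key: the key set is unchanged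
      rw [pvOfList_append, if_pos hmem, ← hK_def]
      have haK : a ∈ K := by
        rw [hK_def, PySem.List.mem_sorted, PySem.Set.mem_ofList]; exact hmem
      have haK1 : a ∈ K₁ := by
        rcases (List.mem_append.mp (hsplit ▸ haK)) with h | h
        · exact h
        · exact absurd (hK2gt a h) (by omega)
      rw [← hsplit, List.flatMap_append]
      have h2 : K₂.flatMap (fun k => (l ++ [p]).filter (fun q => q.1 == k)) =
          K₂.flatMap (fun k => l.filter (fun q => q.1 == k)) := by
        apply List.flatMap_congr
        intro k hk
        rw [hfilter k, if_neg (by have := hK2gt k hk; simp only [beq_iff_eq]; omega), List.append_nil]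
      have h1 : K₁.flatMap (fun k => (l ++ [p]).filter (fun q => q.1 == k)) =
          K₁.flatMap (fun k => l.filter (fun q => q.1 == k)) ++ [p] := by
        have := pvFlatMap_append_last a K₁ (fun k => l.filter (fun q => q.1 == k)) [p]
          (hpwK.sublist (List.takeWhile_sublist _)) hK1le haK1
        rw [← this]
        apply List.flatMap_congr
        intro k hk
        exact hfilter k
      rw [h1, h2, List.append_assoc]
      rfl
    · -- a is a new key: it is inserted between K₁ and K₂
      rw [pvOfList_append, if_neg hmem]
      have hanK : a ∉ K := by
        rw [hK_def, PySem.List.mem_sorted, PySem.Set.mem_ofList]; exact hmem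
      have hK1lt : ∀ k ∈ K₁, k < a := by
        intro k hk
        have h1 := hK1le k hk
        have h2 : k ∈ K := hsplit ▸ List.mem_append_left _ hk
        have : k ≠ a := fun h => hanK (h ▸ h2)
        omega
      have hK' : PySem.List.sorted (PySem.Set.ofList (l.map (fun q => q.1)) ++ [a]) (fun k => k) =
          K₁ ++ a :: K₂ := by
        apply PySem.List.sorted_eq_of_perm_of_pairwise_lt
        · refine List.Perm.trans List.perm_middle ?_
          rw [hsplit]
          exact ((PySem.List.sorted_perm _ _ _).cons a).trans (List.perm_append_singleton a _).symm
        · have hK12 := hsplit ▸ hpwK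
          rw [List.pairwise_append] at hK12
          rw [List.pairwise_append]
          refine ⟨hK12.1, ?_, ?_⟩
          · rw [List.pairwise_cons]
            exact ⟨fun m hm => hK2gt m hm, hK12.2.1⟩
          · intro x hx y hy
            rcases List.mem_cons.mp hy with rfl | hy2
            · exact hK1lt x hx
            · exact hK12.2.2 x hx y hy2
      rw [hK', List.flatMap_append, List.flatMap_cons]
      have hfla : (l ++ [p]).filter (fun q => q.1 == a) = [p] := by
        rw [hfilter a, if_pos (by simp)]
        have : l.filter (fun q => q.1 == a) = [] := by
          rw [List.filter_eq_nil_iff]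
          intro q hq
          simp only [beq_iff_eq]
          exact fun h => hmem (h ▸ List.mem_map_of_mem hq)
        rw [this, List.nil_append]
      have h1 : K₁.flatMap (fun k => (l ++ [p]).filter (fun q => q.1 == k)) =
          K₁.flatMap (fun k => l.filter (fun q => q.1 == k)) := by
        apply List.flatMap_congr
        intro k hk
        rw [hfilter k, if_neg (by have := hK1lt k hk; simp only [beq_iff_eq]; omega), List.append_nil]
      have h2 : K₂.flatMap (fun k => (l ++ [p]).filter (fun q => q.1 == k)) =
          K₂.flatMap (fun k => l.filter (fun q => q.1 == k)) := by
        apply List.flatMap_congr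
        intro k hk
        rw [hfilter k, if_neg (by have := hK2gt k hk; simp only [beq_iff_eq]; omega), List.append_nil]
      rw [h1, h2, hfla]
      rfl

-- run-scanning a concatenation of nonempty single-key blocks with strictly increasing keys
lemma pvGroupRuns_flatMap (K : List Int) (f : Int → List (Int × List (String × String)))
    (hpw : K.Pairwise (· < ·)) (hne : ∀ k ∈ K, f k ≠ [])
    (hfst : ∀ k ∈ K, ∀ q ∈ f k, q.1 = k) :
    pvGroupRuns (K.flatMap f) = K.map (fun k => (k, (f k).map (fun q => q.2))) := by
  induction K with
  | nil => simp only [List.flatMap_nil, List.map_nil]; rw [pvGroupRuns]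
  | cons k t ih =>
      rw [List.pairwise_cons] at hpw
      obtain ⟨p, u, hfk⟩ : ∃ p u, f k = p :: u := by
        cases h : f k with
        | nil => exact absurd h (hne k (by simp))
        | cons p u => exact ⟨p, u, rfl⟩
      have hp1 : p.1 = k := hfst k (by simp) p (by simp [hfk])
      have hrest : ∀ q ∈ t.flatMap f, (q.1 == p.1) = false := by
        intro q hq
        rcases List.mem_flatMap.mp hq with ⟨m, hm, hqm⟩
        have h1 := hfst m (by simp [hm]) q hqm
        have h2 := hpw.1 m hm
        simp only [beq_eq_false_iff_ne, ne_eq, h1, hp1]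
        omega
      have hu : ∀ q ∈ u, (q.1 == p.1) = true := by
        intro q hq
        have := hfst k (by simp) q (by simp [hfk, hq])
        simp [this, hp1]
      rw [List.flatMap_cons, hfk]
      show pvGroupRuns (p :: (u ++ t.flatMap f)) = _
      rw [pvGroupRuns]
      rw [pvTakeWhile_append _ u _ hu hrest, pvDropWhile_append _ u _ hu hrest]
      rw [ih hpw.2 (fun m hm => hne m (by simp [hm])) (fun m hm => hfst m (by simp [hm]))]
      simp [hp1, hfk]

-- ===== VERDICT (by name: the statement is the Claim_ definition above) =====
theorem format_cluster_contents_spec : Claim_equal_format_cluster_contents := by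
  intro clusters codes _ _
  show format_cluster_contents clusters codes = format_cluster_contents_alt clusters codes
  unfold format_cluster_contents format_cluster_contents_alt
  show (PySem.List.sorted
      ((clusters.zip codes).foldl
        (fun (d : PySem.Dict Int (List (List (String × String)))) p =>
          (if d.contains p.1 then d else d.insert p.1 []).modify p.1 [] (fun items => items ++ [p.2]))
        PySem.Dict.empty).keys (fun k => k)).foldl
      (fun html cluster_id =>
        (html ++ "<p><strong>Cluster " ++ PySem.Int.toStr cluster_id ++ "</strong> ("
          ++ PySem.Int.toStr (PySem.List.len
              (((clusters.zip codes).foldl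
                (fun (d : PySem.Dict Int (List (List (String × String)))) p =>
                  (if d.contains p.1 then d else d.insert p.1 []).modify p.1 [] (fun items => items ++ [p.2]))
                PySem.Dict.empty).getD cluster_id [])) ++ " items):<br>"
          ++ PySem.Str.join ", "
            ((((clusters.zip codes).foldl
                (fun (d : PySem.Dict Int (List (List (String × String)))) p =>
                  (if d.contains p.1 then d else d.insert p.1 []).modify p.1 [] (fun items => items ++ [p.2]))
                PySem.Dict.empty).getD cluster_id []).map
              (fun item => PySem.Dict.getD (PySem.Dict.mk item) "code" "")))
          ++ "</p>")
      "<div style='max-height: 400px; overflow-y: auto;'>" ++ "</div>"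
    =
    (pvGroupRuns (PySem.List.sorted (clusters.zip codes) (fun q => q.1))).foldl
      (fun html g =>
        (html ++ "<p><strong>Cluster " ++ PySem.Int.toStr g.1 ++ "</strong> ("
          ++ PySem.Int.toStr (PySem.List.len g.2) ++ " items):<br>"
          ++ PySem.Str.join ", " (g.2.map (fun item => PySem.Dict.getD (PySem.Dict.mk item) "code" "")))
          ++ "</p>")
      "<div style='max-height: 400px; overflow-y: auto;'>" ++ "</div>"
  have hfun : (fun (d : PySem.Dict Int (List (List (String × String)))) (p : Int × List (String × String)) =>
      (if d.contains p.1 then d else d.insert p.1 []).modify p.1 [] (fun items => items ++ [p.2]))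
      = fun d p => d.modify p.1 [] (fun items => items ++ [p.2]) :=
    funext fun d => funext fun p => pvStepA_eq d p
  rw [hfun]
  have hgetD : ∀ cid : Int,
      ((clusters.zip codes).foldl
        (fun (d : PySem.Dict Int (List (List (String × String)))) p =>
          d.modify p.1 [] (fun items => items ++ [p.2])) PySem.Dict.empty).getD cid []
      = ((clusters.zip codes).filter (fun q => q.1 == cid)).map (fun q => q.2) := by
    intro cid
    rw [PySem.Dict.getD_foldl_modify_append]
    simp
  simp only [hgetD]
  have hkeys : ((clusters.zip codes).foldl
      (fun (d : PySem.Dict Int (List (List (String × String)))) p =>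
        d.modify p.1 [] (fun items => items ++ [p.2])) PySem.Dict.empty).keys
      = PySem.Set.ofList ((clusters.zip codes).map (fun q => q.1)) := by
    rw [show ((clusters.zip codes).foldl
      (fun (d : PySem.Dict Int (List (List (String × String)))) p =>
        d.modify p.1 [] (fun items => items ++ [p.2])) PySem.Dict.empty).keys
      = PySem.Set.update PySem.Dict.empty.keys ((clusters.zip codes).map (fun q => q.1)) from
      PySem.Dict.keys_foldl_modify_key (clusters.zip codes) (fun q => q.1) []
        (fun _ p => fun items => items ++ [p.2]) PySem.Dict.empty]
    rw [PySem.Set.ofList_eq_foldl]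
    rfl
  rw [hkeys]
  rw [pvSorted_fst_eq_flatMap (clusters.zip codes)]
  rw [pvGroupRuns_flatMap _ _ (PySem.List.sorted_ofList_pairwise_lt _)
      (by
        intro k hk
        rw [PySem.List.mem_sorted, PySem.Set.mem_ofList] at hk
        rcases List.mem_map.mp hk with ⟨q, hq, rfl⟩
        intro h
        rw [List.filter_eq_nil_iff] at h
        exact h q hq (by simp))
      (by
        intro k _ q hq
        have := List.of_mem_filter hq
        simpa using this)]
  rw [List.foldl_map]
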